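-- pv_equiv track=rewrite | github.com/KushagraaWadhwa/AI-Company-Research | app/agents/universal_data_agent.py | _prioritize_sources
-- ===== SOURCE A (Python) =====
-- from typing import Dict, List, Any, Optional
--
-- def _prioritize_sources(all_urls: Dict) -> Dict:
--     """Prioritize sources based on importance and reliability."""
--     priority_order = ["critical", "high", "medium", "low"]
--     prioritized = {}
--
--     for priority in priority_order:
--         for source_name, source_info in all_urls.items():
--             if source_info["priority"] == priority:
--                 prioritized[source_name] = source_info
--
--     return prioritized
-- ===== SOURCE B (Python) =====
-- def _prioritize_sources(all_urls):
--     """Prioritize sources based on importance and reliability."""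
--     priority_order = ["critical", "high", "medium", "low"]
--     buckets = {p: [] for p in priority_order}
--     for source_name, source_info in all_urls.items():
--         p = source_info["priority"]
--         if p in buckets:
--             buckets[p].append((source_name, source_info))
--     return {name: info for p in priority_order for name, info in buckets[p]}
-- ===== Notes on version B (the rewrite author's own statement) =====
-- stated objective: faster
-- what changed: Replaces the four full scans of all_urls (one per priority level) by a single distribution pass into per-priority buckets followed by concatenating the buckets in priority order.
import Mathlib
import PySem

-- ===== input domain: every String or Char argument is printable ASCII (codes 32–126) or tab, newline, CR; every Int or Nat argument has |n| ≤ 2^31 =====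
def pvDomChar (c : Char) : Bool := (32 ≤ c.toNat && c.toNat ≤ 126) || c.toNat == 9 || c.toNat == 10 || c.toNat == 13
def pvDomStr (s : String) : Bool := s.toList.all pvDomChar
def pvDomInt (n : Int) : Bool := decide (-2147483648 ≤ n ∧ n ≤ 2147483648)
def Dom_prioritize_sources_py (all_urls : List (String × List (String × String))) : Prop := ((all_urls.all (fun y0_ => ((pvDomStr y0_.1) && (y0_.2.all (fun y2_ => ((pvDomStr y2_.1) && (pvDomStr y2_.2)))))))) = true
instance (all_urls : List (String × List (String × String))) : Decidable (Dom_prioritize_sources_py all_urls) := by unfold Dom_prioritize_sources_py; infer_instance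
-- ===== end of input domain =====

-- B replaces A's four full scans of all_urls (one per priority level) by a single
-- distribution pass into per-priority buckets followed by concatenation in priority order.


-- ===== PORT A =====
-- Literal port of A: for each of the four priorities in order, scan all of all_urls
-- and insert every source whose "priority" equals it into the result dict.
-- (source_info["priority"] raises KeyError when the key is missing — that input is
-- outside Pre_; inside Pre_ the lookup is some v, and 'v == priority' is
-- 'get? == some priority'.)
def prioritize_sources_py (all_urls : List (String × List (String × String))) : List (String × List (String × String)) :=
  let priority_order : List String := ["critical", "high", "medium", "low"]
  let prioritized : PySem.Dict String (List (String × String)) :=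
    priority_order.foldl (fun pr priority =>
      all_urls.foldl (fun pr su =>
        if (PySem.Dict.mk su.2).get? "priority" == some priority then
          pr.insert su.1 su.2
        else pr) pr) PySem.Dict.empty
  prioritized.items

-- ===== PORT B =====
-- Literal port of B (Source B): build buckets = {p: [] for p in priority_order}, distribute
-- all_urls in ONE pass (appending (name, info) to buckets[p] only when p is a known
-- priority), then emit the buckets in priority order as a dict comprehension.
-- (The 'none' branch of the match is where Python B raises KeyError — outside Pre_.)
def prioritize_sources_py_alt (all_urls : List (String × List (String × String))) : List (String × List (String × String)) :=
  let priority_order : List String := ["critical", "high", "medium", "low"]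
  let buckets0 : PySem.Dict String (List (String × List (String × String))) :=
    priority_order.foldl (fun b p => b.insert p []) PySem.Dict.empty
  let buckets : PySem.Dict String (List (String × List (String × String))) :=
    all_urls.foldl (fun b su =>
      match (PySem.Dict.mk su.2).get? "priority" with
      | some p => if b.contains p then b.modify p [] (fun l => l ++ [su]) else b
      | none => b) buckets0
  let result : PySem.Dict String (List (String × String)) :=
    priority_order.foldl (fun res p =>
      (buckets.getD p []).foldl (fun res su => res.insert su.1 su.2) res) PySem.Dict.empty
  result.items

-- ===== PRECONDITION & SPEC =====
-- Pre_ excludes (a) sources whose info dict has no "priority" key — there Python A (and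
-- Python B) raise KeyError — and (b) association lists with duplicate keys (outer source
-- names or keys inside one info dict), which cannot arise from a Python dict and which the
-- assoc-list convention would misrepresent (a Python dict keeps the LAST value for a
-- duplicated key, the first-match convention the first).
def Pre_prioritize_sources_py (all_urls : List (String × List (String × String))) : Prop :=
  (∀ su ∈ all_urls, ((PySem.Dict.mk su.2).get? "priority").isSome = true) ∧
  (all_urls.map Prod.fst).Nodup ∧
  (∀ su ∈ all_urls, (su.2.map Prod.fst).Nodup)
instance (all_urls : List (String × List (String × String))) : Decidable (Pre_prioritize_sources_py all_urls) := by unfold Pre_prioritize_sources_py; infer_instance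

def pvWitness_prioritize_sources_py : (List (String × List (String × String))) :=
  [("docs", [("priority", "high"), ("url", "u1")]),
   ("news", [("priority", "critical"), ("url", "u2")]),
   ("misc", [("priority", "unknown")])]

def Spec_prioritize_sources_py (all_urls : List (String × List (String × String))) (out : List (String × List (String × String))) : Prop := out = prioritize_sources_py_alt all_urls
instance (all_urls : List (String × List (String × String))) (out : List (String × List (String × String))) : Decidable (Spec_prioritize_sources_py all_urls out) := by unfold Spec_prioritize_sources_py; infer_instance

-- ===== CLAIM (what is proved, stated in full; the proofs are below) =====
def Claim_equal_prioritize_sources_py : Prop := ∀ (all_urls : List (String × List (String × String))), Dom_prioritize_sources_py all_urls → Pre_prioritize_sources_py all_urls → Spec_prioritize_sources_py all_urls (prioritize_sources_py all_urls)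

-- ===== LEMMAS AND PROOFS =====

-- The selection predicate both programs use: the source's priority equals p.
def pvCond (p : String) (su : String × List (String × String)) : Bool :=
  (PySem.Dict.mk su.2).get? "priority" == some p

-- B's distribution loop fills bucket p with exactly the sources A's scan for p selects,
-- in the same order, provided p is a key of the bucket dict and every source has a priority.
theorem pvBucket_getD (l : List (String × List (String × String)))
    (d : PySem.Dict String (List (String × List (String × String)))) (p : String)
    (hc : d.contains p = true)
    (hs : ∀ su ∈ l, ((PySem.Dict.mk su.2).get? "priority").isSome = true) :
    (l.foldl (fun b su =>
      match (PySem.Dict.mk su.2).get? "priority" with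
      | some q => if b.contains q then b.modify q [] (fun l => l ++ [su]) else b
      | none => b) d).getD p [] = d.getD p [] ++ l.filter (pvCond p) := by
  induction l generalizing d with
  | nil => simp
  | cons su t ih =>
    have hsu := hs su (List.mem_cons_self ..)
    obtain ⟨q, hq⟩ := Option.isSome_iff_exists.mp hsu
    have hst : ∀ x ∈ t, ((PySem.Dict.mk x.2).get? "priority").isSome = true :=
      fun x hx => hs x (List.mem_cons_of_mem _ hx)
    have hcond : pvCond p su = (q == p) := by simp [pvCond, hq]
    simp only [List.foldl_cons, List.filter_cons, hq, hcond]
    by_cases hqc : d.contains q = true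
    · rw [if_pos hqc, ih _ (by simp [PySem.Dict.contains_modify, hc]) hst,
         PySem.Dict.getD_modify]
      by_cases hpq : p = q
      · subst hpq; simp
      · have hqp : (q == p) = false := beq_eq_false_iff_ne.mpr (fun h => hpq h.symm)
        rw [hqp, if_neg hpq]; simp
    · rw [if_neg hqc, ih _ hc hst]
      have hqp : (q == p) = false := by
        refine beq_eq_false_iff_ne.mpr ?_; intro h; subst h; exact hqc hc
      rw [hqp]; simp

-- With an initially empty bucket at p, the bucket is exactly the filtered list.
theorem pvBucket_getD_nil (l : List (String × List (String × String)))
    (d : PySem.Dict String (List (String × List (String × String)))) (p : String)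
    (hc : d.contains p = true)
    (hs : ∀ su ∈ l, ((PySem.Dict.mk su.2).get? "priority").isSome = true)
    (hd0 : d.getD p [] = []) :
    (l.foldl (fun b su =>
      match (PySem.Dict.mk su.2).get? "priority" with
      | some q => if b.contains q then b.modify q [] (fun l => l ++ [su]) else b
      | none => b) d).getD p [] = l.filter (pvCond p) := by
  rw [pvBucket_getD l d p hc hs, hd0, List.nil_append]

-- A's scan-for-p with the guard inside IS a fold of the p-filtered list (List.foldl_filter).
theorem pvScan_eq_filter (all_urls : List (String × List (String × String)))
    (p : String) (pr : PySem.Dict String (List (String × String))) :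
    all_urls.foldl (fun pr su =>
        if (PySem.Dict.mk su.2).get? "priority" == some p then pr.insert su.1 su.2 else pr) pr
      = (all_urls.filter (pvCond p)).foldl (fun pr su => pr.insert su.1 su.2) pr := by
  rw [List.foldl_filter]
  rfl

-- ===== VERDICT (by name: the statement is the Claim_ definition above) =====
theorem prioritize_sources_py_spec : Claim_equal_prioritize_sources_py := by
  intro all_urls _hdom hpre
  obtain ⟨hs, _, _⟩ := hpre
  unfold Spec_prioritize_sources_py prioritize_sources_py prioritize_sources_py_alt
  simp only [List.foldl_cons, List.foldl_nil]
  congr 1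
  have hb := fun p hc hd0 => pvBucket_getD_nil all_urls
    ((((PySem.Dict.empty.insert "critical" ([] : List (String × List (String × String)))).insert
        "high" []).insert "medium" []).insert "low" []) p hc hs hd0
  rw [pvScan_eq_filter, pvScan_eq_filter, pvScan_eq_filter, pvScan_eq_filter,
      hb "critical" (by decide) (by decide), hb "high" (by decide) (by decide),
      hb "medium" (by decide) (by decide), hb "low" (by decide) (by decide)]
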